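-- pv_equiv track=rewrite | github.com/luuconghoangnam/graplite-scan | tools/graplite_scan.py | group_structured_scip_symbols_by_file
-- ===== SOURCE A (Python) =====
-- from collections import defaultdict
-- from typing import Any, Dict, Iterable, List, Optional, Sequence, Set, Tuple
--
-- def file_path_aliases(file_path: str) -> Set[str]:
--     aliases = {file_path}
--     if file_path.startswith('src/'):
--         aliases.add('backend/' + file_path)
--     elif file_path.startswith('backend/src/'):
--         aliases.add(file_path[len('backend/'):])
--     return aliases
--
-- def group_structured_scip_symbols_by_file(structured_symbols_by_file: Dict[str, List[str]]) -> Dict[str, List[str]]: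
--     grouped: Dict[str, List[str]] = defaultdict(list)
--     for file_path, symbols in structured_symbols_by_file.items():
--         for alias in file_path_aliases(file_path):
--             grouped[alias].extend(symbols)
--
--     cleaned: Dict[str, List[str]] = {}
--     for file_path, symbols in grouped.items():
--         seen: Set[str] = set()
--         kept: List[str] = []
--         for symbol in symbols:
--             if symbol in seen:
--                 continue
--             seen.add(symbol)
--             kept.append(symbol)
--         cleaned[file_path] = kept
--     return cleaned
-- ===== SOURCE B (Python) =====
-- from collections import defaultdict
-- from typing import Dict, List, Set
--
-- def file_path_aliases(file_path: str) -> Set[str]: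
--     aliases = {file_path}
--     if file_path.startswith('src/'):
--         aliases.add('backend/' + file_path)
--     elif file_path.startswith('backend/src/'):
--         aliases.add(file_path[len('backend/'):])
--     return aliases
--
-- def group_structured_scip_symbols_by_file(structured_symbols_by_file: Dict[str, List[str]]) -> Dict[str, List[str]]:
--     # Single fused pass: dedup while grouping instead of building full
--     # concatenated lists and rescanning them afterwards.
--     grouped: Dict[str, List[str]] = defaultdict(list)
--     seen: Dict[str, Set[str]] = defaultdict(set)
--     for file_path, symbols in structured_symbols_by_file.items():
--         for alias in file_path_aliases(file_path):
--             bucket = grouped[alias]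
--             seen_alias = seen[alias]
--             for symbol in symbols:
--                 if symbol not in seen_alias:
--                     bucket.append(symbol)
--                     seen_alias.add(symbol)
--     return dict(grouped)
-- ===== Notes on version B (the rewrite author's own statement) =====
-- stated objective: alternative
-- what changed: Fuses A's two passes (group by extending full lists, then rescan each list to dedup) into one pass that deduplicates while grouping, maintaining a per-alias seen-set alongside the grouped buckets; the intermediate concatenated duplicate-bearing lists disappear.
import Mathlib
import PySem

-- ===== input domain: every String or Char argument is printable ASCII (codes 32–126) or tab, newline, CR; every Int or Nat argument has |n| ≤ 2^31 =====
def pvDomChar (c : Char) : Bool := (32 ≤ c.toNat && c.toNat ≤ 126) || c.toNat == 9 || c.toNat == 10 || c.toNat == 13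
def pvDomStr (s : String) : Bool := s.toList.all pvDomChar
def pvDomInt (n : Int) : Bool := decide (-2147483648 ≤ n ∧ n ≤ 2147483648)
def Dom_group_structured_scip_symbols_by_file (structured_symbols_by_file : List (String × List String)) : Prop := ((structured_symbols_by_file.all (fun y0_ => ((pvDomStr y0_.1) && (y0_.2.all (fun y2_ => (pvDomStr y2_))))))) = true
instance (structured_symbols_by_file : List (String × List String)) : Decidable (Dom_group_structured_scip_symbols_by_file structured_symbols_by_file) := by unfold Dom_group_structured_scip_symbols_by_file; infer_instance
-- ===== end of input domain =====

-- B fuses A's two passes (group by extending full lists, then rescan to dedup) into one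
-- pass that deduplicates while grouping with a per-al2 seen-set (return value only).

-- ===== PORT A =====
-- shared helper: the Python helper file_path_aliases, identical in Source A and Source B
def file_path_aliases (file_path : String) : PySem.Set String :=
  let aliases : PySem.Set String := PySem.Set.ofList [file_path]
  if PySem.Str.startswith file_path "src/" then
    PySem.Set.add aliases ("backend/" ++ file_path)
  else if PySem.Str.startswith file_path "backend/src/" then
    PySem.Set.add aliases (PySem.Str.slice file_path (some 8) none)
  else
    aliases

def group_structured_scip_symbols_by_file (structured_symbols_by_file : List (String × List String)) : List (String × List String) :=
  -- pass 1: grouped = defaultdict(list); grouped[al2].extend(symbols)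
  let grouped : PySem.Dict String (List String) :=
    structured_symbols_by_file.foldl (fun g p =>
      (file_path_aliases p.1).foldl (fun g al2 =>
        g.modify al2 [] (fun v => v ++ p.2)) g) PySem.Dict.empty
  -- pass 2: cleaned[file_path] = order-preserving dedup of grouped[file_path]
  let cleaned : PySem.Dict String (List String) :=
    grouped.items.foldl (fun c p =>
      let kept := (p.2.foldl (fun (st : PySem.Set String × List String) s =>
          if PySem.Set.contains st.1 s then st
          else (PySem.Set.add st.1 s, st.2 ++ [s])) (PySem.Set.empty, [])).2
      c.insert p.1 kept) PySem.Dict.empty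
  cleaned.items

-- ===== PORT B =====
def group_structured_scip_symbols_by_file_alt (structured_symbols_by_file : List (String × List String)) : List (String × List String) :=
  -- one pass: grouped buckets and per-al2 seen-sets maintained together
  let st : PySem.Dict String (List String) × PySem.Dict String (PySem.Set String) :=
    structured_symbols_by_file.foldl (fun st p =>
      (file_path_aliases p.1).foldl (fun st al2 =>
        let r := p.2.foldl (fun (bs : List String × PySem.Set String) symbol =>
            if PySem.Set.contains bs.2 symbol then bs
            else (bs.1 ++ [symbol], PySem.Set.add bs.2 symbol))
          (st.1.getD al2 [], st.2.getD al2 PySem.Set.empty)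
        (st.1.insert al2 r.1, st.2.insert al2 r.2)) st)
      (PySem.Dict.empty, PySem.Dict.empty)
  st.1.items

-- ===== PRECONDITION & SPEC =====
def Spec_group_structured_scip_symbols_by_file (structured_symbols_by_file : List (String × List String)) (out : List (String × List String)) : Prop := out = group_structured_scip_symbols_by_file_alt structured_symbols_by_file
instance (structured_symbols_by_file : List (String × List String)) (out : List (String × List String)) : Decidable (Spec_group_structured_scip_symbols_by_file structured_symbols_by_file out) := by unfold Spec_group_structured_scip_symbols_by_file; infer_instance

-- ===== CLAIM (what is proved, stated in full; the proofs are below) =====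
def Claim_equal_group_structured_scip_symbols_by_file : Prop := ∀ (structured_symbols_by_file : List (String × List String)), Dom_group_structured_scip_symbols_by_file structured_symbols_by_file → Spec_group_structured_scip_symbols_by_file structured_symbols_by_file (group_structured_scip_symbols_by_file structured_symbols_by_file)

-- ===== LEMMAS AND PROOFS =====
-- dedup step of port A (seen, kept) and of port B (bucket, seen); Fdd = full dedup fold
def ddA (st : PySem.Set String × List String) (s : String) : PySem.Set String × List String :=
  if PySem.Set.contains st.1 s then st else (PySem.Set.add st.1 s, st.2 ++ [s])

def ddB (bs : List String × PySem.Set String) (symbol : String) : List String × PySem.Set String :=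
  if PySem.Set.contains bs.2 symbol then bs else (bs.1 ++ [symbol], PySem.Set.add bs.2 symbol)

def Fdd (v : List String) : PySem.Set String × List String := v.foldl ddA (PySem.Set.empty, [])

theorem Fdd_append (v w : List String) : Fdd (v ++ w) = w.foldl ddA (Fdd v) := by
  simp [Fdd, List.foldl_append]

theorem foldl_ddB_swap (v : List String) : ∀ (se : PySem.Set String) (kp : List String),
    v.foldl ddB (kp, se) = ((v.foldl ddA (se, kp)).2, (v.foldl ddA (se, kp)).1) := by
  induction v with
  | nil => intro se kp; rfl
  | cons x t ih =>
    intro se kp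
    simp only [List.foldl_cons, ddA, ddB]
    by_cases h : x ∈ se
    · simp [PySem.Set.contains, h, ih]
    · simp [PySem.Set.contains, h, ih]

-- loop invariant: B's fused state vs A's raw grouped dict
def InvAB (gA : PySem.Dict String (List String))
    (st : PySem.Dict String (List String) × PySem.Dict String (PySem.Set String)) : Prop :=
  st.1.keys = gA.keys ∧ gA.keys.Nodup ∧
  ∀ k, (st.2.getD k PySem.Set.empty, st.1.getD k []) = Fdd (gA.getD k [])

theorem step_inv (gA : PySem.Dict String (List String))
    (st : PySem.Dict String (List String) × PySem.Dict String (PySem.Set String))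
    (h : InvAB gA st) (a : String) (syms : List String) :
    InvAB (gA.modify a [] (fun v => v ++ syms))
      (let r := syms.foldl ddB (st.1.getD a [], st.2.getD a PySem.Set.empty)
       (st.1.insert a r.1, st.2.insert a r.2)) := by
  obtain ⟨hk, hnd, hv⟩ := h
  have hca : st.1.contains a = gA.contains a := by
    rw [PySem.Dict.contains_eq_decide_mem_keys, PySem.Dict.contains_eq_decide_mem_keys, hk]
  refine ⟨?_, ?_, ?_⟩
  · show (st.1.insert a _).keys = _
    rw [PySem.Dict.keys_modify]
    by_cases hc : gA.contains a = true
    · rw [PySem.Dict.keys_insert_of_contains _ _ (hca.trans hc),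
        PySem.Dict.keys_insert_of_contains _ _ hc, hk]
    · have hc' : gA.contains a = false := by simpa using hc
      rw [PySem.Dict.keys_insert_of_not_contains _ _ (hca.trans hc'),
        PySem.Dict.keys_insert_of_not_contains _ _ hc', hk]
  · rw [PySem.Dict.keys_modify]
    by_cases hc : gA.contains a = true
    · rw [PySem.Dict.keys_insert_of_contains _ _ hc]; exact hnd
    · have hc' : gA.contains a = false := by simpa using hc
      rw [PySem.Dict.keys_insert_of_not_contains _ _ hc']
      have ha : a ∉ gA.keys := by rw [← PySem.Dict.contains_iff_mem_keys]; simp [hc']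
      exact hnd.append (List.nodup_singleton a) (by simpa [List.disjoint_singleton] using ha)
  · intro k
    by_cases hka : k = a
    · subst hka
      show ((st.2.insert k _).getD k _, (st.1.insert k _).getD k _) = _
      rw [PySem.Dict.getD_insert_self, PySem.Dict.getD_insert_self,
        PySem.Dict.getD_modify_self, foldl_ddB_swap, hv k, Fdd_append]
    · show ((st.2.insert a _).getD k _, (st.1.insert a _).getD k _) = _
      rw [PySem.Dict.getD_insert_of_ne _ _ _ hka, PySem.Dict.getD_insert_of_ne _ _ _ hka,
        PySem.Dict.getD_modify_of_ne _ _ _ hka]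
      exact hv k

theorem alias_fold_inv (al : List String) (syms : List String) :
    ∀ (gA : PySem.Dict String (List String))
      (st : PySem.Dict String (List String) × PySem.Dict String (PySem.Set String)),
      InvAB gA st →
      InvAB (al.foldl (fun g al2 => g.modify al2 [] (fun v => v ++ syms)) gA)
        (al.foldl (fun st al2 =>
          let r := syms.foldl ddB (st.1.getD al2 [], st.2.getD al2 PySem.Set.empty)
          (st.1.insert al2 r.1, st.2.insert al2 r.2)) st) := by
  induction al with
  | nil => intro gA st h; exact h
  | cons a t ih =>
    intro gA st h
    exact ih _ _ (step_inv gA st h a syms)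

theorem outer_fold_inv (l : List (String × List String)) :
    ∀ (gA : PySem.Dict String (List String))
      (st : PySem.Dict String (List String) × PySem.Dict String (PySem.Set String)),
      InvAB gA st →
      InvAB (l.foldl (fun g p =>
            (file_path_aliases p.1).foldl (fun g al2 =>
              g.modify al2 [] (fun v => v ++ p.2)) g) gA)
        (l.foldl (fun st p =>
            (file_path_aliases p.1).foldl (fun st al2 =>
              let r := p.2.foldl ddB (st.1.getD al2 [], st.2.getD al2 PySem.Set.empty)
              (st.1.insert al2 r.1, st.2.insert al2 r.2)) st) st) := by
  induction l with
  | nil => intro gA st h; exact h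
  | cons p t ih =>
    intro gA st h
    exact ih _ _ (alias_fold_inv (file_path_aliases p.1) p.2 gA st h)

theorem Inv_empty : InvAB PySem.Dict.empty (PySem.Dict.empty, PySem.Dict.empty) := by
  refine ⟨rfl, List.nodup_nil, fun k => ?_⟩
  rfl

theorem items_final (GA S1 : PySem.Dict String (List String))
    (hk : S1.keys = GA.keys) (hnd : GA.keys.Nodup)
    (hv : ∀ k, S1.getD k [] = (Fdd (GA.getD k [])).2) :
    (List.foldl (fun c p => c.insert p.1 (Fdd p.2).2) PySem.Dict.empty GA.items).items
      = S1.items := by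
  have hndS : S1.keys.Nodup := by rw [hk]; exact hnd
  rw [PySem.Dict.items_foldl_insert_fresh GA.items (fun p => p.1) (fun p => (Fdd p.2).2)
      PySem.Dict.empty (fun a _ => PySem.Dict.contains_empty _)
      (by simpa [PySem.Dict.keys] using hnd),
    PySem.Dict.items_eq_map_keys GA hnd [],
    PySem.Dict.items_eq_map_keys S1 hndS [], hk, List.map_map]
  simp only [PySem.Dict.empty, List.nil_append]
  exact List.map_congr_left (fun k _ => by simp [Function.comp, hv k])

-- ===== VERDICT (by name: the statement is the Claim_ definition above) =====
theorem group_structured_scip_symbols_by_file_spec : Claim_equal_group_structured_scip_symbols_by_file := by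
  intro l _
  obtain ⟨hk, hnd, hv⟩ :=
    outer_fold_inv l PySem.Dict.empty (PySem.Dict.empty, PySem.Dict.empty) Inv_empty
  show group_structured_scip_symbols_by_file l = group_structured_scip_symbols_by_file_alt l
  show (List.foldl (fun c p => c.insert p.1 (Fdd p.2).2) PySem.Dict.empty
      (List.foldl (fun g p =>
        List.foldl (fun g al2 => g.modify al2 [] fun v => v ++ p.2) g (file_path_aliases p.1))
        PySem.Dict.empty l).items).items
    = (List.foldl (fun st p =>
        List.foldl (fun st al2 =>
          let r := List.foldl ddB (st.1.getD al2 [], st.2.getD al2 PySem.Set.empty) p.2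
          (st.1.insert al2 r.1, st.2.insert al2 r.2)) st (file_path_aliases p.1))
        (PySem.Dict.empty, PySem.Dict.empty) l).1.items
  exact items_final _ _ hk hnd (fun k => congrArg Prod.snd (hv k))
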